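-- pv_equiv track=rewrite | github.com/xinyangj/TabPFN | src/tabpfn/grn/utils.py | compute_feature_to_block_mapping
-- ===== SOURCE A (Python) =====
-- def compute_feature_to_block_mapping(
--     n_features: int,
--     n_feat_pos: int,
-- ) -> tuple[dict[int, list[int]], dict[int, list[int]]]:
--     """Map raw feature indices to attention block indices.
--
--     TabPFN encodes each raw feature as 2 values (value + nan_indicator),
--     then groups every ``features_per_group=3`` encoded values into one
--     attention block.  The target is appended as the last block.
--
--     Parameters
--     ----------
--     n_features : int
--         Number of raw input features (TFs).
--     n_feat_pos : int
--         Number of attention positions (from actual attention tensor shape).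
--         The last position is the target block.
--
--     Returns
--     -------
--     feature_to_blocks : dict[int, list[int]]
--         Maps each raw feature index to its attention block index(es).
--     block_to_features : dict[int, list[int]]
--         Maps each attention block index to its raw feature index(es).
--     """
--     n_blocks = n_feat_pos - 1  # exclude target position
--     feature_to_blocks: dict[int, list[int]] = {}
--     block_to_features: dict[int, list[int]] = {b: [] for b in range(n_blocks)}
--
--     for i in range(n_features):
--         b0 = (2 * i) // 3
--         b1 = (2 * i + 1) // 3
--         blocks = sorted({min(b0, n_blocks - 1), min(b1, n_blocks - 1)})
--         feature_to_blocks[i] = blocks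
--         for b in blocks:
--             if i not in block_to_features[b]:
--                 block_to_features[b].append(i)
--
--     return feature_to_blocks, block_to_features
-- ===== SOURCE B (Python) =====
-- def compute_feature_to_block_mapping(
--     n_features: int,
--     n_feat_pos: int,
-- ) -> tuple[dict[int, list[int]], dict[int, list[int]]]:
--     """Closed-form version: each feature's block pair and each block's
--     feature range are computed arithmetically, with no membership tests,
--     set building or sorting."""
--     n_blocks = n_feat_pos - 1
--     cap = n_blocks - 1
--
--     feature_to_blocks: dict[int, list[int]] = {}
--     for i in range(n_features):
--         b0 = min((2 * i) // 3, cap)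
--         b1 = min((2 * i + 1) // 3, cap)
--         feature_to_blocks[i] = [b0] if b0 == b1 else [b0, b1]
--
--     block_to_features: dict[int, list[int]] = {}
--     for b in range(n_blocks):
--         lo = (3 * b) // 2
--         hi = n_features - 1 if b == cap else min((3 * b + 2) // 2, n_features - 1)
--         block_to_features[b] = list(range(lo, hi + 1))
--
--     return feature_to_blocks, block_to_features
-- ===== Notes on version B (the rewrite author's own statement) =====
-- stated objective: alternative
-- what changed: B replaces A's per-feature set/sort construction and incremental membership-checked appends into block_to_features by two closed-form passes: each feature's block list is the pair (b0,b1) deduplicated by a single comparison, and each block's feature list is computed directly as an arithmetic range list(range(lo, hi+1)) with no membership tests.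
import Mathlib
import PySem

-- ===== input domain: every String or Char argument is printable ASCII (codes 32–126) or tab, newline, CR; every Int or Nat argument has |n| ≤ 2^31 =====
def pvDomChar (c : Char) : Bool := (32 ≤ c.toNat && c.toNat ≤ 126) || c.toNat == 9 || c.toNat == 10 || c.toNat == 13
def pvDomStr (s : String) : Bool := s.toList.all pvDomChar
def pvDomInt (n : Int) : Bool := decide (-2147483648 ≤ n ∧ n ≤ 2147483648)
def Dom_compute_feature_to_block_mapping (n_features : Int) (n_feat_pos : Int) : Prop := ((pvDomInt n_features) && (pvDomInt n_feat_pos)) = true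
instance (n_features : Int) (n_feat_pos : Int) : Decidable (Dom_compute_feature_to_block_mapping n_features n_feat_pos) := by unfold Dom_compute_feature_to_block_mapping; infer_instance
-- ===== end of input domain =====

-- B computes each feature's block list as an explicitly deduplicated pair and each block's
-- feature list as a closed-form arithmetic range, instead of A's set/sort construction and
-- membership-checked appends; objective: alternative (equivalence of return values proved below).

-- ===== PORT A =====
-- loop body of A's 'for i in range(n_features)' (kept as a named helper for the proofs;
-- it is the literal body: blocks = sorted({min(b0,c), min(b1,c)}), dict writes in A's order).
-- Python reads block_to_features[b] (KeyError if b absent); Pre_ guarantees b is a key,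
-- where getD/modify are exact.
def pvStepA (n_blocks : Int)
    (st : PySem.Dict Int (List Int) × PySem.Dict Int (List Int)) (i : Int) :
    PySem.Dict Int (List Int) × PySem.Dict Int (List Int) :=
  let b0 := PySem.Int.floordiv (2 * i) 3
  let b1 := PySem.Int.floordiv (2 * i + 1) 3
  let blocks := PySem.List.sorted
    (PySem.Set.ofList [min b0 (n_blocks - 1), min b1 (n_blocks - 1)]) (fun x => x)
  (st.1.insert i blocks,
   blocks.foldl (fun d b => if i ∈ d.getD b [] then d else d.modify b [] (fun l => l ++ [i])) st.2)

def compute_feature_to_block_mapping (n_features : Int) (n_feat_pos : Int) :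
    (List (Int × List Int)) × (List (Int × List Int)) :=
  let n_blocks := n_feat_pos - 1
  let init : PySem.Dict Int (List Int) × PySem.Dict Int (List Int) :=
    (PySem.Dict.empty,
     PySem.Dict.ofList ((PySem.List.pyRange 0 n_blocks 1).map (fun b => (b, ([] : List Int)))))
  let st := (PySem.List.pyRange 0 n_features 1).foldl (pvStepA n_blocks) init
  (st.1.items, st.2.items)

-- ===== PORT B =====
def compute_feature_to_block_mapping_alt (n_features : Int) (n_feat_pos : Int) :
    (List (Int × List Int)) × (List (Int × List Int)) :=
  let n_blocks := n_feat_pos - 1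
  let cap := n_blocks - 1
  let f2b := (PySem.List.pyRange 0 n_features 1).foldl (fun d i =>
      let b0 := min (PySem.Int.floordiv (2 * i) 3) cap
      let b1 := min (PySem.Int.floordiv (2 * i + 1) 3) cap
      d.insert i (if b0 == b1 then [b0] else [b0, b1])) PySem.Dict.empty
  let b2f := (PySem.List.pyRange 0 n_blocks 1).foldl (fun d b =>
      let lo := PySem.Int.floordiv (3 * b) 2
      let hi := if b == cap then n_features - 1
                else min (PySem.Int.floordiv (3 * b + 2) 2) (n_features - 1)
      d.insert b (PySem.List.pyRange lo (hi + 1) 1)) PySem.Dict.empty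
  (f2b.items, b2f.items)

-- ===== PRECONDITION & SPEC =====
-- A raises KeyError (block_to_features[b] on an absent key) exactly when n_features ≥ 1 and
-- n_feat_pos ≤ 1 (no attention blocks but at least one feature); Pre_ excludes exactly those.
def Pre_compute_feature_to_block_mapping (n_features : Int) (n_feat_pos : Int) : Prop :=
  n_features ≤ 0 ∨ 2 ≤ n_feat_pos
instance (n_features : Int) (n_feat_pos : Int) : Decidable (Pre_compute_feature_to_block_mapping n_features n_feat_pos) := by unfold Pre_compute_feature_to_block_mapping; infer_instance
def pvWitness_compute_feature_to_block_mapping : Int × Int := (5, 4)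

def Spec_compute_feature_to_block_mapping (n_features : Int) (n_feat_pos : Int) (out : (List (Int × List Int)) × (List (Int × List Int))) : Prop := out = compute_feature_to_block_mapping_alt n_features n_feat_pos
instance (n_features : Int) (n_feat_pos : Int) (out : (List (Int × List Int)) × (List (Int × List Int))) : Decidable (Spec_compute_feature_to_block_mapping n_features n_feat_pos out) := by unfold Spec_compute_feature_to_block_mapping; infer_instance

-- ===== CLAIM (what is proved, stated in full; the proofs are below) =====
def Claim_equal_compute_feature_to_block_mapping : Prop := ∀ (n_features : Int) (n_feat_pos : Int), Dom_compute_feature_to_block_mapping n_features n_feat_pos → Pre_compute_feature_to_block_mapping n_features n_feat_pos → Spec_compute_feature_to_block_mapping n_features n_feat_pos (compute_feature_to_block_mapping n_features n_feat_pos)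

-- ===== LEMMAS AND PROOFS =====
theorem pv_fd (a b : Int) (hb : 0 < b) : PySem.Int.floordiv a b = a / b := by
  show Int.fdiv a b = a / b
  rw [Int.fdiv_eq_ediv]
  simp [Int.le_of_lt hb]
def pvBlocksA (c i : Int) : List Int :=
  PySem.List.sorted
    (PySem.Set.ofList [min (PySem.Int.floordiv (2 * i) 3) c,
                       min (PySem.Int.floordiv (2 * i + 1) 3) c]) (fun x => x)
theorem pvBlocksA_eq (c i : Int) :
    pvBlocksA c i =
      if min ((2 * i) / 3) c = min ((2 * i + 1) / 3) c then [min ((2 * i) / 3) c]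
      else [min ((2 * i) / 3) c, min ((2 * i + 1) / 3) c] := by
  unfold pvBlocksA
  rw [pv_fd _ _ (by norm_num), pv_fd _ _ (by norm_num)]
  set x := min ((2 * i) / 3) c
  set y := min ((2 * i + 1) / 3) c with hy
  have hxy : x ≤ y := by
    have : (2 * i) / 3 ≤ (2 * i + 1) / 3 := by omega
    simp only [x, hy]; omega
  by_cases h : x = y
  · rw [if_pos h, ← h]
    have : PySem.Set.ofList [x, x] = [x] := by
      simp [PySem.Set.ofList, PySem.Set.add, PySem.Set.contains]
    rw [this]
    exact PySem.List.sorted_eq_self_of_pairwise _ _ (List.pairwise_singleton _ _)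
  · have : PySem.Set.ofList [x, y] = [x, y] := by
      simp [PySem.Set.ofList, PySem.Set.add, PySem.Set.contains, Ne.symm h]
    rw [this, if_neg h]
    exact PySem.List.sorted_eq_self_of_pairwise _ _ (by simp [List.pairwise_cons]; exact hxy)
theorem pv_mem_blocksA (c i b : Int) :
    b ∈ pvBlocksA c i ↔ (b = min ((2 * i) / 3) c ∨ b = min ((2 * i + 1) / 3) c) := by
  rw [pvBlocksA_eq]
  split_ifs with h
  · simp [h]
  · simp
theorem pv_items_insert_loop (l : List Int) (f : Int → List Int) (hl : l.Nodup) :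
    (l.foldl (fun d i => d.insert i (f i)) PySem.Dict.empty).items
      = l.map (fun i => (i, f i)) := by
  have h := PySem.Dict.items_foldl_insert_fresh l (fun i => i) f PySem.Dict.empty
    (by intro a _; simp [PySem.Dict.contains_empty]) (by simpa using hl)
  simpa using h
theorem pv_items_ofList (l : List (Int × List Int)) (h : (l.map Prod.fst).Nodup) :
    (PySem.Dict.ofList l).items = l := by
  have h2 := PySem.Dict.items_foldl_insert_fresh l Prod.fst Prod.snd PySem.Dict.empty
    (by intro a _; simp [PySem.Dict.contains_empty]) h
  show (l.foldl (fun d p => d.insert p.1 p.2) PySem.Dict.empty).items = l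
  simpa using h2
theorem pv_items_update_one (nb : Int) (v : Int → List Int)
    (d : PySem.Dict Int (List Int))
    (hd : d.items = (PySem.List.pyRange 0 nb 1).map (fun b => (b, v b)))
    (x i : Int) (hx0 : 0 ≤ x) (hx1 : x < nb) (hnot : i ∉ v x) :
    (if i ∈ d.getD x [] then d else d.modify x [] (fun l => l ++ [i])).items
      = (PySem.List.pyRange 0 nb 1).map (fun b => (b, if b = x then v x ++ [i] else v b)) := by
  have hkeys : d.keys.Nodup := by
    show (d.items.map Prod.fst).Nodup
    rw [hd]
    have : List.map Prod.fst ((PySem.List.pyRange 0 nb 1).map (fun b => (b, v b)))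
        = PySem.List.pyRange 0 nb 1 := by
      rw [List.map_map]
      exact List.map_id'' (fun _ => rfl) _
    rw [this]; exact PySem.List.nodup_pyRange_one 0 nb
  have hmem : (x, v x) ∈ d.items := by
    rw [hd]; exact List.mem_map_of_mem (PySem.List.mem_pyRange_one.mpr ⟨hx0, hx1⟩)
  have hget : d.getD x [] = v x := PySem.Dict.getD_of_mem_items d hmem hkeys []
  rw [hget, if_neg hnot]
  have hcont : d.contains x = true := by
    rw [PySem.Dict.contains_iff_mem_keys]
    show x ∈ d.items.map Prod.fst
    exact List.mem_map_of_mem hmem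
  have hmod : d.modify x [] (fun l => l ++ [i]) = d.insert x (v x ++ [i]) := by
    show d.insert x ((d.getD x []) ++ [i]) = _
    rw [hget]
  rw [hmod, PySem.Dict.items_insert_of_contains d _ hcont, hd, List.map_map]
  apply List.map_congr_left
  intro b hb
  by_cases hbx : b = x
  · simp [hbx]
  · simp [Function.comp, hbx]
theorem pv_items_gstep (nb : Int) (v : Int → List Int)
    (d : PySem.Dict Int (List Int))
    (hd : d.items = (PySem.List.pyRange 0 nb 1).map (fun b => (b, v b)))
    (i : Int) (hi : 0 ≤ i) (hnb : 1 ≤ nb) (hnot : ∀ b, i ∉ v b) :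
    ((pvBlocksA (nb - 1) i).foldl
        (fun d b => if i ∈ d.getD b [] then d else d.modify b [] (fun l => l ++ [i])) d).items
      = (PySem.List.pyRange 0 nb 1).map
          (fun b => (b, if b ∈ pvBlocksA (nb - 1) i then v b ++ [i] else v b)) := by
  have hx0 : (0:Int) ≤ min ((2 * i) / 3) (nb - 1) := by omega
  have hx1 : min ((2 * i) / 3) (nb - 1) < nb := by omega
  have hy0 : (0:Int) ≤ min ((2 * i + 1) / 3) (nb - 1) := by omega
  have hy1 : min ((2 * i + 1) / 3) (nb - 1) < nb := by omega
  rw [pvBlocksA_eq]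
  set x := min ((2 * i) / 3) (nb - 1)
  set y := min ((2 * i + 1) / 3) (nb - 1)
  by_cases h : x = y
  · rw [if_pos h]
    simp only [List.foldl_cons, List.foldl_nil]
    rw [pv_items_update_one nb v d hd x i hx0 hx1 (hnot x)]
    apply List.map_congr_left; intro b hb
    by_cases hbx : b = x <;> simp [hbx]
  · rw [if_neg h]
    simp only [List.foldl_cons, List.foldl_nil]
    have h1 := pv_items_update_one nb v d hd x i hx0 hx1 (hnot x)
    set d1 := if i ∈ d.getD x [] then d else d.modify x [] (fun l => l ++ [i]) with hd1
    have h2 := pv_items_update_one nb (fun b => if b = x then v x ++ [i] else v b) d1 h1 y i hy0 hy1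
      (by simp [Ne.symm h]; exact hnot y)
    rw [h2]
    apply List.map_congr_left; intro b hb
    simp only [List.mem_cons, List.not_mem_nil, or_false, Prod.mk.injEq, true_and]
    by_cases hby : b = y
    · simp [hby, Ne.symm h]
    · by_cases hbx : b = x <;> simp [hbx, hby, h]
theorem pv_b2fA_fold (nb : Int) (hnb : 1 ≤ nb) (l : List Int)
    (hpos : ∀ i ∈ l, 0 ≤ i) (hsort : l.Pairwise (· < ·))
    (v : Int → List Int) (hv : ∀ b j, j ∈ v b → ∀ i ∈ l, j < i)
    (d : PySem.Dict Int (List Int))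
    (hd : d.items = (PySem.List.pyRange 0 nb 1).map (fun b => (b, v b))) :
    (l.foldl (fun d i =>
        (pvBlocksA (nb - 1) i).foldl
          (fun d b => if i ∈ d.getD b [] then d else d.modify b [] (fun l => l ++ [i])) d) d).items
      = (PySem.List.pyRange 0 nb 1).map
          (fun b => (b, v b ++ l.filter (fun i => decide (b ∈ pvBlocksA (nb - 1) i)))) := by
  induction l generalizing v d with
  | nil => simpa using hd
  | cons i t ih =>
    simp only [List.foldl_cons]
    have hi : 0 ≤ i := hpos i (List.mem_cons_self ..)
    have hnot : ∀ b, i ∉ v b := by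
      intro b hmem
      exact lt_irrefl i (hv b i hmem i (List.mem_cons_self ..))
    have hstep := pv_items_gstep nb v d hd i hi hnb hnot
    have hlt : ∀ j ∈ t, i < j := (List.pairwise_cons.mp hsort).1
    rw [ih (fun j hj => hpos j (List.mem_cons_of_mem _ hj)) (List.pairwise_cons.mp hsort).2
        (fun b => if b ∈ pvBlocksA (nb - 1) i then v b ++ [i] else v b)
        (by
          intro b j hj i' hi'
          by_cases hb : b ∈ pvBlocksA (nb - 1) i <;> simp [hb] at hj
          · rcases hj with hj | hj
            · exact hv b j hj i' (List.mem_cons_of_mem _ hi')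
            · subst hj; exact hlt i' hi'
          · exact hv b j hj i' (List.mem_cons_of_mem _ hi'))
        _ hstep]
    apply List.map_congr_left; intro b hb
    simp only [Prod.mk.injEq, true_and, List.filter_cons]
    by_cases hbm : b ∈ pvBlocksA (nb - 1) i <;> simp [hbm]
theorem pv_filter_pyRange_interval (n lo hi1 : Int) (h0 : 0 ≤ lo) (h1 : hi1 ≤ n)
    (p : Int → Prop) [DecidablePred p]
    (hp : ∀ i, 0 ≤ i → i < n → (p i ↔ (lo ≤ i ∧ i < hi1))) :
    (PySem.List.pyRange 0 n 1).filter (fun i => decide (p i)) = PySem.List.pyRange lo hi1 1 := by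
  by_cases hle : hi1 ≤ lo
  · rw [PySem.List.pyRange_one_eq_nil hle, List.filter_eq_nil_iff]
    intro i hi
    have := PySem.List.mem_pyRange_one.mp hi
    simp only [decide_eq_true_eq]
    intro hpi
    have := (hp i this.1 this.2).mp hpi
    omega
  · have hsplit : PySem.List.pyRange 0 n 1
        = PySem.List.pyRange 0 lo 1 ++ PySem.List.pyRange lo hi1 1 ++ PySem.List.pyRange hi1 n 1 := by
      rw [PySem.List.pyRange_one_append 0 hi1 n (by omega) h1,
          PySem.List.pyRange_one_append 0 lo hi1 h0 (by omega)]
    rw [hsplit, List.filter_append, List.filter_append]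
    have e1 : (PySem.List.pyRange 0 lo 1).filter (fun i => decide (p i)) = [] := by
      rw [List.filter_eq_nil_iff]; intro i hi
      have h := PySem.List.mem_pyRange_one.mp hi
      simp only [decide_eq_true_eq]; intro hpi
      have := (hp i h.1 (by omega)).mp hpi; omega
    have e3 : (PySem.List.pyRange hi1 n 1).filter (fun i => decide (p i)) = [] := by
      rw [List.filter_eq_nil_iff]; intro i hi
      have h := PySem.List.mem_pyRange_one.mp hi
      simp only [decide_eq_true_eq]; intro hpi
      have := (hp i (by omega) h.2).mp hpi; omega
    have e2 : (PySem.List.pyRange lo hi1 1).filter (fun i => decide (p i))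
        = PySem.List.pyRange lo hi1 1 := by
      rw [List.filter_eq_self]; intro i hi
      have h := PySem.List.mem_pyRange_one.mp hi
      simp only [decide_eq_true_eq]
      exact (hp i (by omega) (by omega)).mpr ⟨h.1, h.2⟩
    rw [e1, e2, e3, List.nil_append, List.append_nil]
theorem pv_filter_blocks (n nb b : Int) (hb0 : 0 ≤ b) (hb1 : b < nb) :
    (PySem.List.pyRange 0 n 1).filter (fun i => decide (b ∈ pvBlocksA (nb - 1) i))
      = PySem.List.pyRange (PySem.Int.floordiv (3 * b) 2)
          ((if b == nb - 1 then n - 1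
            else min (PySem.Int.floordiv (3 * b + 2) 2) (n - 1)) + 1) 1 := by
  rw [pv_fd _ _ (by norm_num)]
  by_cases hbc : b = nb - 1
  · rw [if_pos (by exact beq_iff_eq.mpr hbc)]
    apply pv_filter_pyRange_interval n ((3 * b) / 2) (n - 1 + 1) (by omega) (by omega)
    intro i h0 h1
    rw [pv_mem_blocksA]
    constructor
    · rintro (h | h) <;> omega
    · intro h; right; omega
  · rw [if_neg (by simp [hbc]), pv_fd _ _ (by norm_num)]
    apply pv_filter_pyRange_interval n ((3 * b) / 2) _ (by omega) (by omega)
    intro i h0 h1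
    rw [pv_mem_blocksA]
    constructor
    · rintro (h | h) <;> omega
    · intro h
      by_cases hx : b = min ((2 * i) / 3) (nb - 1)
      · exact Or.inl hx
      · right; omega
-- normal form shared by both ports
theorem pv_portA_eq (n p : Int) (hpre : n ≤ 0 ∨ 2 ≤ p) :
    compute_feature_to_block_mapping n p
      = ((PySem.List.pyRange 0 n 1).map (fun i => (i, pvBlocksA (p - 1 - 1) i)),
         (PySem.List.pyRange 0 (p - 1) 1).map
           (fun b => (b, (PySem.List.pyRange 0 n 1).filter
                           (fun i => decide (b ∈ pvBlocksA (p - 1 - 1) i))))) := by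
  simp only [compute_feature_to_block_mapping]
  rw [show pvStepA (p - 1) = (fun (st : PySem.Dict Int (List Int) × PySem.Dict Int (List Int)) i =>
        ((fun (d : PySem.Dict Int (List Int)) (i : Int) =>
            d.insert i (pvBlocksA (p - 1 - 1) i)) st.1 i,
         (fun (d : PySem.Dict Int (List Int)) (i : Int) =>
            (pvBlocksA (p - 1 - 1) i).foldl
              (fun d b => if i ∈ d.getD b [] then d else d.modify b [] (fun l => l ++ [i])) d)
           st.2 i)) from rfl]
  beta_reduce
  rw [PySem.List.foldl_prod_mk
        (f := fun (d : PySem.Dict Int (List Int)) (i : Int) => d.insert i (pvBlocksA (p - 1 - 1) i))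
        (g := fun (d : PySem.Dict Int (List Int)) (i : Int) =>
          (pvBlocksA (p - 1 - 1) i).foldl
            (fun d b => if i ∈ d.getD b [] then d else d.modify b [] (fun l => l ++ [i])) d)]
  have hd0 : (PySem.Dict.ofList
      ((PySem.List.pyRange 0 (p - 1) 1).map (fun b => (b, ([] : List Int))))).items
      = (PySem.List.pyRange 0 (p - 1) 1).map (fun b => (b, ([] : List Int))) := by
    apply pv_items_ofList
    rw [List.map_map]
    have : (Prod.fst ∘ fun b : Int => (b, ([] : List Int))) = fun b : Int => b := rfl
    rw [this, List.map_id']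
    exact PySem.List.nodup_pyRange_one 0 (p - 1)
  refine Prod.ext ?_ ?_
  · exact pv_items_insert_loop _ _ (PySem.List.nodup_pyRange_one 0 n)
  · show (List.foldl _ (PySem.Dict.ofList _) _).items = _
    by_cases hn : n ≤ 0
    · rw [PySem.List.pyRange_one_eq_nil hn]
      simp only [List.foldl_nil, List.filter_nil]
      exact hd0
    · have h2p : 2 ≤ p := by rcases hpre with h | h <;> omega
      have := pv_b2fA_fold (p - 1) (by omega) (PySem.List.pyRange 0 n 1)
        (fun i hi => (PySem.List.mem_pyRange_one.mp hi).1)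
        (PySem.List.pairwise_lt_pyRange_one 0 n)
        (fun _ => []) (by intro b j hj; simp at hj) _ hd0
      rw [this]
      simp
theorem pv_portB_eq (n p : Int) :
    compute_feature_to_block_mapping_alt n p
      = ((PySem.List.pyRange 0 n 1).map (fun i => (i, pvBlocksA (p - 1 - 1) i)),
         (PySem.List.pyRange 0 (p - 1) 1).map
           (fun b => (b, (PySem.List.pyRange 0 n 1).filter
                           (fun i => decide (b ∈ pvBlocksA (p - 1 - 1) i))))) := by
  simp only [compute_feature_to_block_mapping_alt]
  refine Prod.ext ?_ ?_
  · show (List.foldl (fun d i => d.insert i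
        (if (min (PySem.Int.floordiv (2 * i) 3) (p - 1 - 1)
              == min (PySem.Int.floordiv (2 * i + 1) 3) (p - 1 - 1)) = true
         then [min (PySem.Int.floordiv (2 * i) 3) (p - 1 - 1)]
         else [min (PySem.Int.floordiv (2 * i) 3) (p - 1 - 1),
               min (PySem.Int.floordiv (2 * i + 1) 3) (p - 1 - 1)]))
        PySem.Dict.empty (PySem.List.pyRange 0 n 1)).items = _
    rw [pv_items_insert_loop _ _ (PySem.List.nodup_pyRange_one 0 n)]
    apply List.map_congr_left
    intro i hi
    rw [pv_fd _ _ (by norm_num), pv_fd _ _ (by norm_num), pvBlocksA_eq]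
    by_cases h : min ((2 * i) / 3) (p - 1 - 1) = min ((2 * i + 1) / 3) (p - 1 - 1)
      <;> simp [h]
  · show (List.foldl (fun d b => d.insert b
        (PySem.List.pyRange (PySem.Int.floordiv (3 * b) 2)
          ((if (b == p - 1 - 1) = true then n - 1
            else min (PySem.Int.floordiv (3 * b + 2) 2) (n - 1)) + 1) 1))
        PySem.Dict.empty (PySem.List.pyRange 0 (p - 1) 1)).items = _
    rw [pv_items_insert_loop _ _ (PySem.List.nodup_pyRange_one 0 (p - 1))]
    apply List.map_congr_left
    intro b hb
    have h := PySem.List.mem_pyRange_one.mp hb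
    rw [← pv_filter_blocks n (p - 1) b h.1 h.2]
-- ===== VERDICT (by name: the statement is the Claim_ definition above) =====
theorem compute_feature_to_block_mapping_spec : Claim_equal_compute_feature_to_block_mapping := by
  intro n p _ hpre
  unfold Spec_compute_feature_to_block_mapping
  rw [pv_portA_eq n p hpre, pv_portB_eq n p]
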